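-- pv_equiv track=rewrite | github.com/HaotianFrankZhang/Allocate-Protein-Hinges | PolB/Results/structure_demo/CheckLigands/class_readPDB.py | spliteLine
-- ===== SOURCE A (Python) =====
-- def splitChar(str):
--     curr = ''
--     flag = -10
--     newStr = []
--     for i in range(len(str)):
--         if str[i] == '.':
--             flag = i
--         if i == flag + 4:
--             newStr.append(curr)
--             curr = ''
--         curr += str[i]
--     newStr.append(curr)
--     return newStr
--
-- def spliteLine(line):
--     newLine = []
--     for item in line:
--         currItem = splitChar(item)
--         if len(currItem) > 1:
--             newLine += currItem
--         else:
--             newLine.append(item)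
--     return newLine
-- ===== SOURCE B (Python) =====
-- def segments(s):
--     # cut exactly at i when the most recent '.' at or before i sits at i-4:
--     # a stateless window test replaces A's running flag
--     cuts = [i for i in range(4, len(s)) if s[i-4] == '.' and '.' not in s[i-3:i+1]]
--     parts, prev = [], 0
--     for c in cuts:
--         parts.append(s[prev:c])
--         prev = c
--     parts.append(s[prev:])
--     return parts
--
-- def spliteLine(line):
--     out = []
--     for item in line:
--         out += segments(item)
--     return out
-- ===== Notes on version B (the rewrite author's own statement) =====
-- stated objective: alternative
-- what changed: A's single stateful pass (a running last-dot flag plus an accumulating current segment flushed at each cut) is replaced by a stateless window scan that lists cut positions up front (cut at i iff s[i-4]=='.' and no '.' in s[i-3:i+1]) and then slices the string between successive cuts; the per-item length>1 branch disappears since a cut-free string yields exactly [item].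
import Mathlib
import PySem

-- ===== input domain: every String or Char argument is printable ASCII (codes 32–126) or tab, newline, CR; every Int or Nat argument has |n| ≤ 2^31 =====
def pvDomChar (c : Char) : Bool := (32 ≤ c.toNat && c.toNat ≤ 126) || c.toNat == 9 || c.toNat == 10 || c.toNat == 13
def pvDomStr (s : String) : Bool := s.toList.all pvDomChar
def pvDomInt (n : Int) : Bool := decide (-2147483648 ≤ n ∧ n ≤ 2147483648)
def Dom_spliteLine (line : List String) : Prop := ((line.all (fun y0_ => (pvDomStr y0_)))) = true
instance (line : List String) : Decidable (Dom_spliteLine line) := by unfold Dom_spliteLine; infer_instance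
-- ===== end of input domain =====

-- B replaces A's running `flag` state with a stateless four-char window test that
-- lists the cut positions up front, then slices; objective: alternative decomposition.

-- ===== PORT A =====
-- strings are handled as List Char (wrapped back with String.ofList at the end);
-- `for i in range(len(str)): str[i]` is the fold over enumerate(str).
def stepA (st : List Char × Int × List (List Char)) (p : Int × Char) :
    List Char × Int × List (List Char) :=
  let flag := if p.2 = '.' then p.1 else st.2.1        -- if str[i] == '.': flag = i
  if p.1 = flag + 4 then                               -- if i == flag + 4: flush curr
    ([p.2], flag, st.2.2 ++ [st.1])                    -- newStr.append(curr); curr = '' + str[i]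
  else
    (st.1 ++ [p.2], flag, st.2.2)                      -- curr += str[i]

def splitChar (s : String) : List String :=
  let r := (PySem.List.enumerate s.toList 0).foldl stepA ([], -10, [])
  (r.2.2 ++ [r.1]).map String.ofList                   -- newStr.append(curr); return newStr

def spliteLine (line : List String) : List String :=
  line.foldl (fun newLine item =>
    let currItem := splitChar item
    if currItem.length > 1 then newLine ++ currItem else newLine ++ [item]) []

-- ===== PORT B =====
-- `s[i-4] == '.' and '.' not in s[i-3:i+1]` ; all indices are in range (4 ≤ i < len s),
-- so the slice is (drop (i-3)).take 4 and range(4, len s) is range' 4 (len s - 4); exact here.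
def cutP (cs : List Char) (i : Nat) : Bool :=
  cs.getD (i - 4) ' ' == '.' && !(((cs.drop (i - 3)).take 4).contains '.')

def cutsOf (cs : List Char) : List Nat :=
  (List.range' 4 (cs.length - 4) 1).filter (cutP cs)

-- the (parts, prev) loop over cuts
def buildB (cs : List Char) (cuts : List Nat) : List (List Char) × Nat :=
  cuts.foldl (fun st c => (st.1 ++ [(cs.drop st.2).take (c - st.2)], c)) ([], 0)

def segments (s : String) : List String :=
  let cs := s.toList
  let st := buildB cs (cutsOf cs)
  (st.1 ++ [cs.drop st.2]).map String.ofList           -- parts.append(s[prev:])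

def spliteLine_alt (line : List String) : List String :=
  line.foldl (fun out item => out ++ segments item) []

-- ===== PRECONDITION & SPEC =====
def Spec_spliteLine (line : List String) (out : List String) : Prop := out = spliteLine_alt line
instance (line : List String) (out : List String) : Decidable (Spec_spliteLine line out) := by unfold Spec_spliteLine; infer_instance

-- ===== CLAIM (what is proved, stated in full; the proofs are below) =====
def Claim_equal_spliteLine : Prop := ∀ (line : List String), Dom_spliteLine line → Spec_spliteLine line (spliteLine line)

-- ===== LEMMAS AND PROOFS =====

-- the flag component alone: last index of '.' so far, -10 if none
def ldot (cs : List Char) : Int :=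
  (PySem.List.enumerate cs 0).foldl (fun f p => if p.2 = '.' then p.1 else f) (-10)

theorem ldot_append (cs : List Char) (c : Char) :
    ldot (cs ++ [c]) = if c = '.' then (cs.length : Int) else ldot cs := by
  unfold ldot
  rw [PySem.List.enumerate_append, List.foldl_append]
  simp [PySem.List.enumerate_cons, PySem.List.enumerate_nil]

theorem getD_snoc_last {α : Type} (l : List α) (c d : α) : (l ++ [c]).getD l.length d = c := by
  simp [List.getD_eq_getElem?_getD]

-- ldot is bounded and characterises the LAST dot position
theorem ldot_char (cs : List Char) :
    (ldot cs = -10 ∨ (0 ≤ ldot cs ∧ ldot cs < (cs.length : Int))) ∧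
    (∀ j : Nat, (ldot cs = (j : Int) ↔
      (j < cs.length ∧ cs.getD j ' ' = '.' ∧ ¬ ('.' ∈ cs.drop (j + 1))))) := by
  induction cs using List.reverseRecOn with
  | nil =>
      constructor
      · left; rfl
      · intro j; simp [ldot, PySem.List.enumerate_nil]
  | append_singleton xs x ih =>
      obtain ⟨hb, hc⟩ := ih
      rw [ldot_append]
      by_cases hx : x = '.'
      · subst hx
        rw [if_pos rfl]
        constructor
        · right
          refine ⟨by exact_mod_cast Nat.zero_le _, ?_⟩
          exact_mod_cast (show xs.length < (xs ++ ['.']).length by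
            rw [List.length_append, List.length_cons, List.length_nil]; omega)
        · intro j
          by_cases hj : j = xs.length
          · subst hj
            constructor
            · intro _
              refine ⟨by simp, getD_snoc_last xs '.' ' ', ?_⟩
              rw [List.drop_of_length_le (by simp)]
              simp
            · intro _; rfl
          · constructor
            · intro h; exfalso; apply hj; exact_mod_cast h.symm
            · rintro ⟨h1, _, h3⟩
              exfalso
              have hjlt : j < xs.length := by
                rw [List.length_append] at h1; simp at h1; omega
              apply h3
              rw [List.drop_append_of_le_length (by omega)]
              simp
      · rw [if_neg hx]
        constructor
        · rcases hb with h | ⟨h1, h2⟩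
          · left; exact h
          · right
            refine ⟨h1, ?_⟩
            rw [List.length_append]; push_cast; omega
        · intro j
          rw [hc j]
          by_cases hj : j = xs.length
          · subst hj
            constructor
            · rintro ⟨h, _⟩; omega
            · rintro ⟨_, h2, _⟩
              rw [getD_snoc_last] at h2
              exact absurd h2 hx
          · by_cases hjlt : j < xs.length
            · rw [List.getD_append _ _ _ _ hjlt,
                  List.drop_append_of_le_length (by omega)]
              have hx' : ¬ '.' = x := fun h => hx h.symm
              simp [hx']
              intros
              omega
            · constructor
              · rintro ⟨h, _⟩; omega
              · rintro ⟨h, _⟩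
                rw [List.length_append] at h; simp at h; omega

theorem take_window (cs : List Char) (c : Char) :
    ((cs ++ [c]).drop (cs.length - 3)).take 4 = cs.drop (cs.length - 3) ++ [c] := by
  rw [List.drop_append_of_le_length (by omega)]
  apply List.take_of_length_le
  simp only [List.length_append, List.length_drop, List.length_cons, List.length_nil]
  omega

-- cutP is stable under appending a char, below the appended index
theorem cutP_append (cs : List Char) (c : Char) (i : Nat) (h4 : 4 ≤ i) (hi : i < cs.length) :
    cutP (cs ++ [c]) i = cutP cs i := by
  unfold cutP
  rw [List.getD_append _ _ _ _ (by omega),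
      List.drop_append_of_le_length (by omega),
      List.take_append_of_le_length (by simp; omega)]

theorem cutsOf_append (cs : List Char) (c : Char) :
    cutsOf (cs ++ [c]) =
      cutsOf cs ++ (if 4 ≤ cs.length ∧ cutP (cs ++ [c]) cs.length then [cs.length] else []) := by
  unfold cutsOf
  by_cases h4 : 4 ≤ cs.length
  · have hlen : (cs ++ [c]).length - 4 = (cs.length - 4) + 1 := by simp; omega
    rw [hlen, List.range'_concat, List.filter_append]
    have h44 : 4 + 1 * (cs.length - 4) = cs.length := by omega
    rw [h44]
    congr 1
    · apply List.filter_congr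
      intro i hi
      rw [List.mem_range'_1] at hi
      rw [cutP_append cs c i hi.1 (by omega)]
    · simp only [List.filter]
      by_cases hcut : cutP (cs ++ [c]) cs.length
      · rw [hcut]; simp [h4]
      · simp only [Bool.not_eq_true] at hcut; rw [hcut]; simp
  · have h1 : cs.length - 4 = 0 := by omega
    have h2 : (cs ++ [c]).length - 4 = 0 := by simp; omega
    rw [h1, h2]
    simp [h4]

-- buildB only looks at cs below the cut indices
theorem buildB_stable (cs : List Char) (c : Char) (cuts : List Nat)
    (h : ∀ x ∈ cuts, x ≤ cs.length) :
    ∀ parts prev, prev ≤ cs.length →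
      cuts.foldl (fun st x => (st.1 ++ [((cs ++ [c]).drop st.2).take (x - st.2)], x)) (parts, prev)
        = cuts.foldl (fun st x => (st.1 ++ [(cs.drop st.2).take (x - st.2)], x)) (parts, prev) := by
  induction cuts with
  | nil => intro parts prev _; rfl
  | cons y ys ih =>
      intro parts prev hprev
      have hy : y ≤ cs.length := h y (by simp)
      simp only [List.foldl_cons]
      rw [List.drop_append_of_le_length hprev,
          List.take_append_of_le_length (by simp; omega)]
      exact ih (fun x hx => h x (by simp [hx])) _ y hy

theorem buildB_prev_le (cs : List Char) (cuts : List Nat) (n : Nat)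
    (h : ∀ x ∈ cuts, x ≤ n) :
    ∀ parts (prev : Nat), prev ≤ n →
      (cuts.foldl (fun st x => (st.1 ++ [(cs.drop st.2).take (x - st.2)], x)) (parts, prev)).2 ≤ n := by
  induction cuts with
  | nil => intro parts prev hp; exact hp
  | cons y ys ih =>
      intro parts prev _
      simp only [List.foldl_cons]
      exact ih (fun x hx => h x (by simp [hx])) _ y (h y (by simp))

theorem buildB_len (cs : List Char) (cuts : List Nat) :
    ∀ parts (prev : Nat),
      (cuts.foldl (fun st x => (st.1 ++ [(cs.drop st.2).take (x - st.2)], x)) (parts, prev)).1.length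
        = parts.length + cuts.length := by
  induction cuts with
  | nil => intro parts prev; simp
  | cons y ys ih =>
      intro parts prev
      simp only [List.foldl_cons]
      rw [ih]
      simp
      omega

theorem cutsOf_le (cs : List Char) : ∀ x ∈ cutsOf cs, x ≤ cs.length := by
  intro x hx
  unfold cutsOf at hx
  rw [List.mem_filter, List.mem_range'_1] at hx
  omega

theorem cutP_end_dot (xs : List Char) : cutP (xs ++ ['.']) xs.length = false := by
  unfold cutP
  rw [take_window]
  simp

theorem cut_iff (xs : List Char) (c : Char) (hc : c ≠ '.') :
    ((xs.length : Int) = ldot xs + 4) ↔ (4 ≤ xs.length ∧ cutP (xs ++ [c]) xs.length = true) := by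
  obtain ⟨hb, hch⟩ := ldot_char xs
  constructor
  · intro h
    have h4 : 4 ≤ xs.length := by
      rcases hb with hb | ⟨hb1, hb2⟩ <;> omega
    have hld : ldot xs = ((xs.length - 4 : Nat) : Int) := by omega
    rw [hch (xs.length - 4)] at hld
    obtain ⟨_, hdot, hnod⟩ := hld
    have hsub : xs.length - 4 + 1 = xs.length - 3 := by omega
    rw [hsub] at hnod
    refine ⟨h4, ?_⟩
    unfold cutP
    rw [List.getD_append _ _ _ _ (by omega), take_window]
    rw [List.getD_eq_getElem?_getD] at hdot
    simp [hdot, hnod, Ne.symm hc]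
  · rintro ⟨h4, hcut⟩
    unfold cutP at hcut
    rw [List.getD_append _ _ _ _ (by omega), take_window] at hcut
    simp [List.getD_eq_getElem?_getD] at hcut
    obtain ⟨hdot, hnod, -⟩ := hcut
    have hl : ldot xs = ((xs.length - 4 : Nat) : Int) := by
      rw [hch]
      refine ⟨by omega, ?_, ?_⟩
      · rw [List.getD_eq_getElem?_getD]; exact hdot
      · have hsub : xs.length - 4 + 1 = xs.length - 3 := by omega
        rw [hsub]
        exact hnod
    push_cast at hl
    omega

theorem stepA_eq (st : List Char × Int × List (List Char)) (i : Int) (c : Char) :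
    stepA st (i, c) =
      if i = (if c = '.' then i else st.2.1) + 4 then
        ([c], (if c = '.' then i else st.2.1), st.2.2 ++ [st.1])
      else
        (st.1 ++ [c], (if c = '.' then i else st.2.1), st.2.2) := rfl

-- the main invariant: A's fold state in terms of B's cuts/slices
theorem main_inv (cs : List Char) :
    (PySem.List.enumerate cs 0).foldl stepA ([], -10, []) =
      (cs.drop (buildB cs (cutsOf cs)).2, ldot cs, (buildB cs (cutsOf cs)).1) := by
  induction cs using List.reverseRecOn with
  | nil => rfl
  | append_singleton xs c ih =>
      have hle := cutsOf_le xs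
      have hprev : (buildB xs (cutsOf xs)).2 ≤ xs.length :=
        buildB_prev_le xs (cutsOf xs) xs.length hle [] 0 (by omega)
      rw [PySem.List.enumerate_append, List.foldl_append, ih]
      simp only [PySem.List.enumerate_cons, PySem.List.enumerate_nil,
        List.foldl_cons, List.foldl_nil, zero_add]
      rw [stepA_eq, cutsOf_append, ldot_append]
      by_cases hcond : 4 ≤ xs.length ∧ cutP (xs ++ [c]) xs.length = true
      · -- a cut happens at index xs.length
        have hc : c ≠ '.' := by
          intro h; subst h
          rw [cutP_end_dot] at hcond
          exact absurd hcond.2 (by simp)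
        have hcut : ((xs.length : Int) = ldot xs + 4) := (cut_iff xs c hc).2 hcond
        rw [if_pos hcond]
        have h1 : buildB (xs ++ [c]) (cutsOf xs ++ [xs.length])
            = ((buildB (xs ++ [c]) (cutsOf xs)).1 ++
                [((xs ++ [c]).drop (buildB (xs ++ [c]) (cutsOf xs)).2).take
                  (xs.length - (buildB (xs ++ [c]) (cutsOf xs)).2)], xs.length) := by
          unfold buildB
          rw [List.foldl_append]
          simp only [List.foldl_cons, List.foldl_nil]
        have h2 : buildB (xs ++ [c]) (cutsOf xs) = buildB xs (cutsOf xs) := by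
          unfold buildB
          exact buildB_stable xs c (cutsOf xs) hle [] 0 (by omega)
        rw [h1, h2, List.drop_append_of_le_length hprev,
            List.take_append_of_le_length (by simp),
            List.take_of_length_le (by simp)]
        have hdrop : (xs ++ [c]).drop xs.length = [c] := by
          rw [List.drop_append_of_le_length (le_refl _)]
          simp
        rw [hdrop]
        simp only [if_neg hc]
        rw [if_pos hcut]
      · -- no cut
        rw [if_neg hcond, List.append_nil]
        have hB2 : buildB (xs ++ [c]) (cutsOf xs) = buildB xs (cutsOf xs) := by
          unfold buildB
          exact buildB_stable xs c (cutsOf xs) hle [] 0 (by omega)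
        rw [hB2, List.drop_append_of_le_length hprev]
        by_cases hc : c = '.'
        · subst hc
          rw [if_pos rfl, if_neg (by omega)]
        · simp only [if_neg hc]
          have hnocut : ¬ ((xs.length : Int) = ldot xs + 4) := by
            intro h
            exact hcond ((cut_iff xs c hc).1 h)
          rw [if_neg hnocut]

theorem splitChar_eq (s : String) : splitChar s = segments s := by
  unfold splitChar segments
  rw [main_inv]

theorem segments_single (s : String) : (splitChar s).length ≤ 1 → segments s = [s] := by
  rw [splitChar_eq]
  intro h
  have hlen : (buildB s.toList (cutsOf s.toList)).1.length = (cutsOf s.toList).length := by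
    unfold buildB
    rw [buildB_len]
    simp
  simp only [segments, List.length_map, List.length_append, List.length_cons,
    List.length_nil, hlen] at h
  have hnil : cutsOf s.toList = [] := List.length_eq_zero_iff.mp (by omega)
  simp only [segments, hnil]
  unfold buildB
  simp [String.ofList_toList]

-- ===== VERDICT (by name: the statement is the Claim_ definition above) =====
theorem spliteLine_spec : Claim_equal_spliteLine := by
  intro line hd
  clear hd
  unfold Spec_spliteLine spliteLine spliteLine_alt
  induction line using List.reverseRecOn with
  | nil => rfl
  | append_singleton xs x ih =>
      rw [List.foldl_append, List.foldl_append, List.foldl_cons, List.foldl_nil,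
          List.foldl_cons, List.foldl_nil, ih]
      simp only [splitChar_eq]
      by_cases h : (segments x).length > 1
      · rw [if_pos h]
      · rw [if_neg h, segments_single x (by rw [splitChar_eq]; omega)]
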